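-- pv_equiv track=rewrite | github.com/vchakrab/DiffDel | ttryscript.py | find_inference_paths_str
-- ===== SOURCE A (Python) =====
-- from typing import List, Tuple, Set
--
-- def find_inference_paths_str(hyperedges: List[Tuple[str, ...]],
--                              target_cell: str,
--                              initial_known: Set[str]) -> List[List[int]]:
--     all_paths: List[List[int]] = []
--     seen_paths = set()
--
--     def dfs(known: Set[str], path: List[int], used_edges: Set[int]):
--         for edge_idx, edge in enumerate(hyperedges):
--             if edge_idx in used_edges:
--                 continue
--
--             edge_set = set(edge)
--             unknown = edge_set - known
--
--             if len(unknown) == 1: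
--                 inferred = next(iter(unknown))
--
--                 new_known = set(known)
--                 new_known.add(inferred)
--
--                 new_path = path + [edge_idx]
--                 new_used = set(used_edges)
--                 new_used.add(edge_idx)
--
--                 if inferred == target_cell:
--                     t = tuple(new_path)
--                     if t not in seen_paths:
--                         seen_paths.add(t)
--                         all_paths.append(new_path)
--                     continue
--
--                 dfs(new_known, new_path, new_used)
--
--     dfs(set(initial_known), [], set())
--     return all_paths
-- ===== SOURCE B (Python) =====
-- # B: iterative worklist version — explicit LIFO stack of tagged items instead of recursion.
-- def find_inference_paths_str(hyperedges, target_cell, initial_known):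
--     all_paths = []
--     seen_paths = set()
--     stack = [('expand', set(initial_known), [], set())]
--     while stack:
--         item = stack.pop()
--         if item[0] == 'emit':
--             new_path = item[1]
--             t = tuple(new_path)
--             if t not in seen_paths:
--                 seen_paths.add(t)
--                 all_paths.append(new_path)
--             continue
--         _, known, path, used = item
--         children = []
--         for idx, edge in enumerate(hyperedges):
--             if idx in used:
--                 continue
--             unknown = set(edge) - known
--             if len(unknown) == 1:
--                 inferred = next(iter(unknown))
--                 new_path = path + [idx]
--                 if inferred == target_cell:
--                     children.append(('emit', new_path))
--                 else:
--                     new_known = set(known)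
--                     new_known.add(inferred)
--                     new_used = set(used)
--                     new_used.add(idx)
--                     children.append(('expand', new_known, new_path, new_used))
--         stack.extend(reversed(children))
--     return all_paths
-- ===== Notes on version B (the rewrite author's own statement) =====
-- stated objective: alternative
-- what changed: The recursive DFS with a nested closure is replaced by an iterative worklist: an explicit LIFO stack of tagged items ('emit' a finished path / 'expand' a frame), children pushed in reverse index order so the emission order is A's exact DFS pre-order.
import Mathlib
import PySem

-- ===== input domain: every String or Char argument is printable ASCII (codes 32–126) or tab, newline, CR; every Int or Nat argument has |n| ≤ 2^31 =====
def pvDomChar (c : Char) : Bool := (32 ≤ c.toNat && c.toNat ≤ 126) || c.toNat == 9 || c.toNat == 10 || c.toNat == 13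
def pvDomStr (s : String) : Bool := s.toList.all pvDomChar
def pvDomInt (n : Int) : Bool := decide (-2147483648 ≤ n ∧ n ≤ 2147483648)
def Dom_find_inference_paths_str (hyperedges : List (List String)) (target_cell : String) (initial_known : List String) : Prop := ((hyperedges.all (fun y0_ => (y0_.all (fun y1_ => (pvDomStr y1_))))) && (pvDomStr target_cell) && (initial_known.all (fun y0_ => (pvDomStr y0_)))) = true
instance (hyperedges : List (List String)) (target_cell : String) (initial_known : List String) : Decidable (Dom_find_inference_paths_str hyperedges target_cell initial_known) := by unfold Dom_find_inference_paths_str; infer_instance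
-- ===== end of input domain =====

-- B replaces A's recursive DFS closure by an iterative worklist (explicit LIFO stack of
-- tagged emit/expand items, children pushed in reverse index order); same output values.
-- The Nat fuel parameters in both ports are totality guards only, proved never to run out.

-- ===== PORT A =====
-- A's dfs: loop over (edges suffix, running index); recursion descends on a new frame.
-- fuel is a totality guard (the Python recursion depth is bounded by the number of edges).
def pvDfsA (he : List (List String)) (tgt : String) :
    Nat → List (List String) → Nat → List String → List Int → List Nat →
    List (List Int) × List (List Int) → List (List Int) × List (List Int)
  | _, [], _, _, _, _, st => st
  | fuel, e :: es, idx, known, path, used, st =>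
    if used.contains idx then pvDfsA he tgt fuel es (idx+1) known path used st
    else
      let unk := PySem.Set.diff (PySem.Set.ofList e) known
      if unk.length = 1 then
        let inferred := unk.headD ""
        let np := path ++ [(idx : Int)]
        if inferred = tgt then
          pvDfsA he tgt fuel es (idx+1) known path used
            (if st.1.contains np then st else (st.1 ++ [np], st.2 ++ [np]))
        else
          match fuel with
          | 0 => st
          | f+1 =>
            pvDfsA he tgt (f+1) es (idx+1) known path used
              (pvDfsA he tgt f he 0 (PySem.Set.add known inferred) np (PySem.Set.add used idx) st)
      else pvDfsA he tgt fuel es (idx+1) known path used st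
  termination_by fuel es _ _ _ _ _ => (fuel, es.length)
  decreasing_by
  all_goals first
    | exact Prod.Lex.left _ _ (by omega)
    | exact Prod.Lex.right _ (by simp)

def find_inference_paths_str (hyperedges : List (List String)) (target_cell : String) (initial_known : List String) : List (List Int) :=
  (pvDfsA hyperedges target_cell (hyperedges.length + 1) hyperedges 0
    (PySem.Set.ofList initial_known) [] [] ([], [])).2

-- ===== PORT B =====
-- worklist item: a finished path to record, or a frame to expand
inductive PVItem where
  | emit : List Int → PVItem
  | expand : List String → List Int → List Nat → PVItem

-- the discovery for-loop of Source B: children of one popped frame, in index order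
def pvChildren (he : List (List String)) (tgt : String) :
    List (List String) → Nat → List String → List Int → List Nat → List PVItem
  | [], _, _, _, _ => []
  | e :: es, idx, known, path, used =>
    if used.contains idx then pvChildren he tgt es (idx+1) known path used
    else
      let unk := PySem.Set.diff (PySem.Set.ofList e) known
      if unk.length = 1 then
        let inferred := unk.headD ""
        let np := path ++ [(idx : Int)]
        (if inferred = tgt then PVItem.emit np
         else PVItem.expand (PySem.Set.add known inferred) np (PySem.Set.add used idx))
          :: pvChildren he tgt es (idx+1) known path used
      else pvChildren he tgt es (idx+1) known path used

-- the while loop of Source B; head of the list = top of the stack (push reversed = children ++ rest);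
-- fuel is a totality guard, one unit per pop, proved sufficient below
def pvLoopB (he : List (List String)) (tgt : String) :
    Nat → List PVItem → List (List Int) × List (List Int) → List (List Int) × List (List Int)
  | 0, _, st => st
  | _+1, [], st => st
  | f+1, PVItem.emit np :: rest, st =>
    pvLoopB he tgt f rest (if st.1.contains np then st else (st.1 ++ [np], st.2 ++ [np]))
  | f+1, PVItem.expand known path used :: rest, st =>
    pvLoopB he tgt f (pvChildren he tgt he 0 known path used ++ rest) st

def find_inference_paths_str_alt (hyperedges : List (List String)) (target_cell : String) (initial_known : List String) : List (List Int) :=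
  (pvLoopB hyperedges target_cell ((hyperedges.length + 1) ^ (hyperedges.length + 3))
    [PVItem.expand (PySem.Set.ofList initial_known) [] []] ([], [])).2

-- ===== PRECONDITION & SPEC =====
def Spec_find_inference_paths_str (hyperedges : List (List String)) (target_cell : String) (initial_known : List String) (out : List (List Int)) : Prop := out = find_inference_paths_str_alt hyperedges target_cell initial_known
instance (hyperedges : List (List String)) (target_cell : String) (initial_known : List String) (out : List (List Int)) : Decidable (Spec_find_inference_paths_str hyperedges target_cell initial_known out) := by unfold Spec_find_inference_paths_str; infer_instance

-- ===== CLAIM (what is proved, stated in full; the proofs are below) =====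
def Claim_equal_find_inference_paths_str : Prop := ∀ (hyperedges : List (List String)) (target_cell : String) (initial_known : List String), Dom_find_inference_paths_str hyperedges target_cell initial_known → Spec_find_inference_paths_str hyperedges target_cell initial_known (find_inference_paths_str hyperedges target_cell initial_known)

-- ===== LEMMAS AND PROOFS =====

-- number of edge indices < n not yet used
def pvCnt (used : List Nat) (n : Nat) : Nat :=
  ((List.range n).filter (fun i => !(used.contains i))).length

lemma pvCnt_nil (n : Nat) : pvCnt [] n = n := by
  simp [pvCnt]

lemma pv_filter_len_lt (p : Nat → Bool) : ∀ (l : List Nat) (x : Nat), x ∈ l → p x = false →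
    (l.filter p).length < l.length := by
  intro l
  induction l with
  | nil => intro x hx; cases hx
  | cons a t ih =>
    intro x hx hp
    rcases List.mem_cons.mp hx with h | h
    · subst h
      rw [List.filter_cons, if_neg (by simp [hp])]
      exact Nat.lt_succ_of_le (List.length_filter_le _ _)
    · by_cases ha : p a = true
      · simpa [List.filter_cons, ha] using Nat.succ_lt_succ (ih x h hp)
      · rw [List.filter_cons, if_neg ha]
        exact Nat.lt_succ_of_lt (ih x h hp)

lemma pvCnt_append_lt (used : List Nat) (n idx : Nat)
    (h1 : idx < n) (h2 : used.contains idx = false) :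
    pvCnt (used ++ [idx]) n < pvCnt used n := by
  unfold pvCnt
  have hsub : ((List.range n).filter (fun i => !((used ++ [idx]).contains i)))
      = ((List.range n).filter (fun i => !(used.contains i))).filter (fun i => !(i == idx)) := by
    rw [List.filter_filter]
    apply List.filter_congr
    intro a _
    cases h3 : a == idx
    · simp_all
    · simp_all
  rw [hsub]
  apply pv_filter_len_lt (fun i => !(i == idx)) _ idx
  · have h2' : idx ∉ used := by simpa using h2
    simp [List.mem_filter, List.mem_range, h1, h2']
  · simp

lemma pvLoopB_nil (he : List (List String)) (tgt : String) (g : Nat) (st) :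
    pvLoopB he tgt g [] st = st := by
  cases g <;> simp [pvLoopB]

lemma pv_main (he : List (List String)) (tgt : String) :
    ∀ (fA : Nat) (edges : List (List String)) (idx : Nat) (known : List String)
      (path : List Int) (used : List Nat) (st : List (List Int) × List (List Int))
      (rest : List PVItem),
      edges = he.drop idx →
      pvCnt used he.length < fA →
      ∃ c, c ≤ edges.length * (he.length + 1) ^ fA ∧
        ∀ g, pvLoopB he tgt (c + g) (pvChildren he tgt edges idx known path used ++ rest) st
              = pvLoopB he tgt g rest (pvDfsA he tgt fA edges idx known path used st) := by
  intro fA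
  induction fA with
  | zero =>
    intro edges idx known path used st rest _ hcnt
    exact absurd hcnt (Nat.not_lt_zero _)
  | succ f ihf =>
    intro edges
    induction edges with
    | nil =>
      intro idx known path used st rest _ _
      refine ⟨0, by simp, ?_⟩
      intro g
      simp [pvChildren, pvDfsA]
    | cons e es ihe =>
      intro idx known path used st rest hdrop hcnt
      have hidx : idx < he.length := by
        by_contra hle
        have hnil : he.drop idx = [] := List.drop_eq_nil_of_le (by omega)
        rw [hnil] at hdrop
        cases hdrop
      have hdrop' : es = he.drop (idx + 1) := by
        have ht := congrArg List.tail hdrop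
        simpa [List.tail_drop] using ht
      have hKf1 : 1 ≤ (he.length + 1) ^ (f + 1) := Nat.one_le_pow _ _ (by omega)
      cases hu : used.contains idx with
      | true =>
        obtain ⟨c, hcb, hrun⟩ := ihe (idx + 1) known path used st rest hdrop' hcnt
        refine ⟨c, le_trans hcb (Nat.mul_le_mul_right _ (by simp)), ?_⟩
        intro g
        have hch : pvChildren he tgt (e :: es) idx known path used
            = pvChildren he tgt es (idx + 1) known path used := by
          simp only [pvChildren]; rw [if_pos hu]
        have hdf : pvDfsA he tgt (f + 1) (e :: es) idx known path used st
            = pvDfsA he tgt (f + 1) es (idx + 1) known path used st := by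
          simp only [pvDfsA]; rw [if_pos hu]
        rw [hch, hdf]
        exact hrun g
      | false =>
        have hnc : ¬(used.contains idx = true) := by rw [hu]; simp
        by_cases hlen : (PySem.Set.diff (PySem.Set.ofList e) known).length = 1
        · by_cases htgt : (PySem.Set.diff (PySem.Set.ofList e) known).headD "" = tgt
          · -- emit case
            obtain ⟨c, hcb, hrun⟩ := ihe (idx + 1) known path used
              (if st.1.contains (path ++ [(idx : Int)]) then st
               else (st.1 ++ [path ++ [(idx : Int)]], st.2 ++ [path ++ [(idx : Int)]])) rest hdrop' hcnt
            refine ⟨c + 1, ?_, ?_⟩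
            · calc c + 1 ≤ es.length * (he.length + 1) ^ (f + 1) + 1 := by omega
                _ ≤ es.length * (he.length + 1) ^ (f + 1) + (he.length + 1) ^ (f + 1) :=
                    Nat.add_le_add_left hKf1 _
                _ = (es.length + 1) * (he.length + 1) ^ (f + 1) := (Nat.succ_mul _ _).symm
            · intro g
              have hch : pvChildren he tgt (e :: es) idx known path used
                  = PVItem.emit (path ++ [(idx : Int)]) :: pvChildren he tgt es (idx + 1) known path used := by
                simp only [pvChildren]; rw [if_neg hnc, if_pos hlen, if_pos htgt]
              have hdf : pvDfsA he tgt (f + 1) (e :: es) idx known path used st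
                  = pvDfsA he tgt (f + 1) es (idx + 1) known path used
                      (if st.1.contains (path ++ [(idx : Int)]) then st
                       else (st.1 ++ [path ++ [(idx : Int)]], st.2 ++ [path ++ [(idx : Int)]])) := by
                simp only [pvDfsA]; rw [if_neg hnc, if_pos hlen, if_pos htgt]
              have e1 : c + 1 + g = (c + g) + 1 := by omega
              rw [e1, hch, hdf, List.cons_append]
              simp only [pvLoopB]
              exact hrun g
          · -- expand case
            have hmem : idx ∉ used := by simpa using hu
            have hcnt' : pvCnt (PySem.Set.add used idx) he.length < f := by
              have hadd : PySem.Set.add used idx = used ++ [idx] := by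
                simp [PySem.Set.add, hmem]
              rw [hadd]
              have := pvCnt_append_lt used he.length idx hidx hu
              omega
            obtain ⟨cc, hccb, hcrun⟩ := ihf he 0
              (PySem.Set.add known ((PySem.Set.diff (PySem.Set.ofList e) known).headD ""))
              (path ++ [(idx : Int)]) (PySem.Set.add used idx) st
              (pvChildren he tgt es (idx + 1) known path used ++ rest) (by simp) hcnt'
            obtain ⟨cr, hcrb, hrrun⟩ := ihe (idx + 1) known path used
              (pvDfsA he tgt f he 0
                (PySem.Set.add known ((PySem.Set.diff (PySem.Set.ofList e) known).headD ""))
                (path ++ [(idx : Int)]) (PySem.Set.add used idx) st) rest hdrop' hcnt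
            refine ⟨1 + cc + cr, ?_, ?_⟩
            · have h2 : 1 + cc ≤ (he.length + 1) ^ (f + 1) := by
                have hKf : 1 ≤ (he.length + 1) ^ f := Nat.one_le_pow _ _ (by omega)
                calc 1 + cc ≤ 1 + he.length * (he.length + 1) ^ f := Nat.add_le_add_left hccb 1
                  _ ≤ (he.length + 1) ^ f + he.length * (he.length + 1) ^ f :=
                      Nat.add_le_add_right hKf _
                  _ = (he.length + 1) ^ (f + 1) := by rw [pow_succ]; ring
              calc 1 + cc + cr
                  ≤ (he.length + 1) ^ (f + 1) + es.length * (he.length + 1) ^ (f + 1) :=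
                    Nat.add_le_add h2 hcrb
                _ = (es.length + 1) * (he.length + 1) ^ (f + 1) := by
                    rw [Nat.succ_mul, Nat.add_comm]
            · intro g
              have hch : pvChildren he tgt (e :: es) idx known path used
                  = PVItem.expand
                      (PySem.Set.add known ((PySem.Set.diff (PySem.Set.ofList e) known).headD ""))
                      (path ++ [(idx : Int)]) (PySem.Set.add used idx)
                    :: pvChildren he tgt es (idx + 1) known path used := by
                simp only [pvChildren]; rw [if_neg hnc, if_pos hlen, if_neg htgt]
              have hdf : pvDfsA he tgt (f + 1) (e :: es) idx known path used st
                  = pvDfsA he tgt (f + 1) es (idx + 1) known path used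
                      (pvDfsA he tgt f he 0
                        (PySem.Set.add known ((PySem.Set.diff (PySem.Set.ofList e) known).headD ""))
                        (path ++ [(idx : Int)]) (PySem.Set.add used idx) st) := by
                simp only [pvDfsA]; rw [if_neg hnc, if_pos hlen, if_neg htgt]
              have e1 : 1 + cc + cr + g = (cc + (cr + g)) + 1 := by omega
              rw [e1, hch, hdf, List.cons_append]
              simp only [pvLoopB]
              rw [hcrun (cr + g), hrrun g]
        · -- unknown size ≠ 1: skip
          obtain ⟨c, hcb, hrun⟩ := ihe (idx + 1) known path used st rest hdrop' hcnt
          refine ⟨c, le_trans hcb (Nat.mul_le_mul_right _ (by simp)), ?_⟩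
          intro g
          have hch : pvChildren he tgt (e :: es) idx known path used
              = pvChildren he tgt es (idx + 1) known path used := by
            simp only [pvChildren]; rw [if_neg hnc, if_neg hlen]
          have hdf : pvDfsA he tgt (f + 1) (e :: es) idx known path used st
              = pvDfsA he tgt (f + 1) es (idx + 1) known path used st := by
            simp only [pvDfsA]; rw [if_neg hnc, if_neg hlen]
          rw [hch, hdf]
          exact hrun g

-- ===== VERDICT (by name: the statement is the Claim_ definition above) =====
theorem find_inference_paths_str_spec : Claim_equal_find_inference_paths_str := by
  intro he tgt init _
  unfold Spec_find_inference_paths_str find_inference_paths_str find_inference_paths_str_alt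
  obtain ⟨c, hcb, hrun⟩ := pv_main he tgt (he.length + 1) he 0 (PySem.Set.ofList init) [] []
    ([], []) [] (by simp : he = List.drop 0 he) (by rw [pvCnt_nil]; omega)
  have hone : 1 ≤ (he.length + 1) ^ (he.length + 3) := Nat.one_le_pow _ _ (by omega)
  obtain ⟨m, hm⟩ : ∃ m, (he.length + 1) ^ (he.length + 3) = m + 1 :=
    ⟨(he.length + 1) ^ (he.length + 3) - 1, by omega⟩
  have h1 : he.length * (he.length + 1) ^ (he.length + 1) + 1 ≤ (he.length + 1) ^ (he.length + 2) := by
    have hKf : 1 ≤ (he.length + 1) ^ (he.length + 1) := Nat.one_le_pow _ _ (by omega)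
    calc he.length * (he.length + 1) ^ (he.length + 1) + 1
        ≤ he.length * (he.length + 1) ^ (he.length + 1) + (he.length + 1) ^ (he.length + 1) :=
          Nat.add_le_add_left hKf _
      _ = (he.length + 1) ^ (he.length + 2) := by rw [pow_succ]; ring
  have h2 : (he.length + 1) ^ (he.length + 2) ≤ (he.length + 1) ^ (he.length + 3) :=
    Nat.pow_le_pow_right (by omega) (by omega)
  have hcm : c ≤ m := by
    have hchain : c + 1 ≤ m + 1 := by
      calc c + 1 ≤ he.length * (he.length + 1) ^ (he.length + 1) + 1 := Nat.add_le_add_right hcb 1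
        _ ≤ (he.length + 1) ^ (he.length + 2) := h1
        _ ≤ (he.length + 1) ^ (he.length + 3) := h2
        _ = m + 1 := hm
    omega
  rw [hm]
  have hstep : pvLoopB he tgt (m + 1) [PVItem.expand (PySem.Set.ofList init) [] []] ([], [])
      = pvLoopB he tgt m (pvChildren he tgt he 0 (PySem.Set.ofList init) [] [] ++ []) ([], []) := by
    simp only [pvLoopB]
  rw [hstep]
  have e1 : m = c + (m - c) := by omega
  rw [e1, hrun (m - c), pvLoopB_nil]
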